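-- pv_equiv track=rewrite | github.com/kanngji/thisisCodingTest | programmers/lv0/96.py | solution
-- ===== SOURCE A (Python) =====
-- def solution(array):
--     # 카운터로는 dict 자료형을 많이 이용
--     # list 보다 효율적이다 for문 다돌려서 list 확인안해도되니
--     times_dict = {}
--     for num in array:
--         if num not in times_dict:
--             times_dict[num] = 0 # key,value 값중 value 값에 0을 넣음
--         times_dict[num]+=1 # 있으면 횟수 추가
--     mode = float('-inf')
--     mode_times = second_times = 0
--
--     for key,value in times_dict.items(): # key,value 둘다 순회하려고 itmes() 사용
--         if value > mode_times: # 횟수가 0보다크면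
--             mode = key # 최대값 비교
--             mode_times = value # value값 저장
--         elif value == mode_times:
--             second_times = value # 최빈값이 여러개이면
--
--
--     return mode if mode_times != second_times else -1
-- ===== SOURCE B (Python) =====
-- def solution(array):
--     # Sort, then scan maximal runs of equal values: the run lengths are the
--     # frequencies, so no hash table is needed.
--     s = sorted(array)
--     n = len(s)
--     best_len, best_val, tie = 0, -1, False
--     i = 0
--     while i < n:
--         x = s[i]
--         j = i
--         while j < n and s[j] == x:
--             j += 1
--         run = j - i
--         if run > best_len:
--             best_len, best_val, tie = run, x, False
--         elif run == best_len:
--             tie = True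
--         i = j
--     return -1 if tie else best_val
-- ===== Notes on version B (the rewrite author's own statement) =====
-- stated objective: alternative
-- what changed: Replaces A's hash-table counting pass plus items() scan by sorting the array and scanning maximal runs of equal adjacent values, tracking the longest run and a tie flag; correct because run lengths of the sorted array are exactly the element frequencies.
import Mathlib
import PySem

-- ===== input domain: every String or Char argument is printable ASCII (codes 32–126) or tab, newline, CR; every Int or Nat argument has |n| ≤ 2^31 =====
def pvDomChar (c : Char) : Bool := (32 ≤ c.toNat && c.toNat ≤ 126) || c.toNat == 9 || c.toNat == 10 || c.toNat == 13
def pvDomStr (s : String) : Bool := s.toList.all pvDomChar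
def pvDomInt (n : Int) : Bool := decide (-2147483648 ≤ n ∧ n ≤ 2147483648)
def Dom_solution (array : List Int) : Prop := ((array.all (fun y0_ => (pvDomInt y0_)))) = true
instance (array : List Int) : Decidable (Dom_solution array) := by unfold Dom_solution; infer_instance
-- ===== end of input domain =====

-- B replaces A's dict-counting pass plus items() scan by sorting the array and scanning maximal
-- runs of equal adjacent values (objective: alternative); same return value on every input.

-- ===== PORT A =====
-- one iteration of A's counting loop: 'if num not in times_dict: times_dict[num] = 0; times_dict[num] += 1'
def pvStepCount (d : PySem.Dict Int Int) (num : Int) : PySem.Dict Int Int :=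
  let d' := if d.contains num = false then d.insert num 0 else d
  d'.insert num (d'.getD num 0 + 1)

-- one iteration of A's mode loop over items; state = (mode, mode_times, second_times);
-- 'none' stands for the initial mode = float('-inf'), which A never returns
def pvModeStep (s : Option Int × Int × Int) (p : Int × Int) : Option Int × Int × Int :=
  if s.2.1 < p.2 then (some p.1, p.2, s.2.2)
  else if p.2 = s.2.1 then (s.1, s.2.1, p.2)
  else s

def solution (array : List Int) : Int :=
  let times := array.foldl pvStepCount PySem.Dict.empty
  let r := times.items.foldl pvModeStep (none, 0, 0)
  -- 'return mode if mode_times != second_times else -1'; when the condition holds mode has been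
  -- assigned some key (mode_times > 0), so the .getD default is never used
  if r.2.1 ≠ r.2.2 then r.1.getD (-1) else -1

-- ===== PORT B =====
-- B's outer while-loop over the sorted list, one call per maximal run; the inner
-- 'while j < n and s[j] == x: j += 1' computes exactly the length of the run of s[i]
-- starting at index i, i.e. the takeWhile length, and 'i = j' moves to the dropWhile tail
def pvRunScan (s : List Int) (st : Int × Int × Bool) : Int × Int × Bool :=
  match s with
  | [] => st
  | x :: t =>
    let run : Int := ((x :: t).takeWhile (fun y => y == x)).length
    let st' := if st.1 < run then (run, x, false)
               else if run = st.1 then (st.1, st.2.1, true) else st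
    pvRunScan ((x :: t).dropWhile (fun y => y == x)) st'
  termination_by s.length
  decreasing_by
    simp only [List.dropWhile_cons, beq_self_eq_true, if_true]
    have := t.length_dropWhile_le (fun y => y == x)
    simp only [List.length_cons]
    omega

def solution_alt (array : List Int) : Int :=
  let r := pvRunScan (PySem.List.sorted array (fun x => x) false) (0, -1, false)
  if r.2.2 then -1 else r.2.1

-- ===== PRECONDITION & SPEC =====
def Spec_solution (array : List Int) (out : Int) : Prop := out = solution_alt array
instance (array : List Int) (out : Int) : Decidable (Spec_solution array out) := by unfold Spec_solution; infer_instance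

-- ===== CLAIM (what is proved, stated in full; the proofs are below) =====
def Claim_equal_solution : Prop := ∀ (array : List Int), Dom_solution array → Spec_solution array (solution array)

-- ===== LEMMAS AND PROOFS =====

-- the (value, run length) decomposition that B's outer loop walks through
def pvRuns (s : List Int) : List (Int × Int) :=
  match s with
  | [] => []
  | x :: t =>
    (x, (((x :: t).takeWhile (fun y => y == x)).length : Int)) ::
      pvRuns ((x :: t).dropWhile (fun y => y == x))
  termination_by s.length
  decreasing_by
    simp only [List.dropWhile_cons, beq_self_eq_true, if_true]
    have := t.length_dropWhile_le (fun y => y == x)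
    simp only [List.length_cons]
    omega

-- one step of B's loop, on a (value, run length) pair
def pvStepB (st : Int × Int × Bool) (p : Int × Int) : Int × Int × Bool :=
  if st.1 < p.2 then (p.2, p.1, false)
  else if p.2 = st.1 then (st.1, st.2.1, true) else st

lemma pvRunScan_eq_foldl (s : List Int) (st : Int × Int × Bool) :
    pvRunScan s st = (pvRuns s).foldl pvStepB st := by
  induction s, st using pvRunScan.induct with
  | case1 st => simp [pvRunScan, pvRuns]
  | case2 st x t run st' ih =>
    rw [pvRunScan, pvRuns]
    simp only [List.foldl_cons]
    show _ = List.foldl pvStepB (pvStepB st _) _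
    rw [pvStepB]
    exact ih

-- everything after the first run of a sorted list is strictly larger than its head
lemma sorted_dropWhile_lt (x : Int) (t : List Int) (hs : (x :: t).Pairwise (· ≤ ·)) :
    ∀ z ∈ (x :: t).dropWhile (fun y => y == x), x < z := by
  intro z hz
  have hsub : List.Sublist ((x :: t).dropWhile (fun y => y == x)) (x :: t) := List.dropWhile_sublist _
  have hle : ∀ w ∈ (x :: t), x ≤ w := by
    intro w hw
    rcases List.mem_cons.mp hw with rfl | hw'
    · exact le_refl _
    · exact (List.pairwise_cons.mp hs).1 w hw'
  have hdp : ((x :: t).dropWhile (fun y => y == x)).Pairwise (· ≤ ·) := hs.sublist hsub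
  cases hdrop : (x :: t).dropWhile (fun y => y == x) with
  | nil => rw [hdrop] at hz; exact absurd hz (by simp)
  | cons y d =>
    have hy : (y == x) = false := by
      have := List.head_dropWhile_not (fun y => y == x) (l := x :: t) (w := by rw [hdrop]; simp)
      simp only [hdrop, List.head_cons] at this
      exact this
    rw [hdrop] at hz hdp
    simp only [beq_eq_false_iff_ne, ne_eq] at hy
    have hyx : x < y := by
      have : y ∈ (x :: t) := hsub.subset (hdrop ▸ List.mem_cons_self)
      have := hle y this
      omega
    rcases List.mem_cons.mp hz with rfl | hz'
    · exact hyx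
    · have := (List.pairwise_cons.mp hdp).1 z hz'
      omega

-- in a sorted list the count of the head is the length of its initial run
lemma count_head_sorted (x : Int) (t : List Int) (hs : (x :: t).Pairwise (· ≤ ·)) :
    (x :: t).count x = ((x :: t).takeWhile (fun y => y == x)).length := by
  conv_lhs => rw [← List.takeWhile_append_dropWhile (p := fun y => y == x) (l := x :: t)]
  rw [List.count_append]
  have h1 : ((x :: t).dropWhile (fun y => y == x)).count x = 0 := by
    apply List.count_eq_zero.mpr
    intro hx
    exact absurd (sorted_dropWhile_lt x t hs x hx) (by omega)
  have h2 : ((x :: t).takeWhile (fun y => y == x)).count x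
      = ((x :: t).takeWhile (fun y => y == x)).length := by
    apply List.count_eq_length.mpr
    intro b hb
    have := List.mem_takeWhile_imp hb
    simp at this
    omega
  omega

-- counts of strictly larger values survive dropping the initial run
lemma count_tail_sorted (x : Int) (t : List Int) (z : Int) (hz : x < z) :
    (x :: t).count z = ((x :: t).dropWhile (fun y => y == x)).count z := by
  conv_lhs => rw [← List.takeWhile_append_dropWhile (p := fun y => y == x) (l := x :: t)]
  rw [List.count_append]
  have h1 : ((x :: t).takeWhile (fun y => y == x)).count z = 0 := by
    apply List.count_eq_zero.mpr
    intro hx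
    have := List.mem_takeWhile_imp hx
    simp at this
    omega
  omega

-- runs of a sorted list: keys are its distinct values, run lengths are the counts
lemma pvRuns_char : ∀ s : List Int, s.Pairwise (· ≤ ·) →
    (∀ p ∈ pvRuns s, p.1 ∈ s ∧ p.2 = (s.count p.1 : Int)) ∧
    (∀ z ∈ s, z ∈ (pvRuns s).map Prod.fst) ∧
    ((pvRuns s).map Prod.fst).Nodup := by
  intro s
  induction s using pvRuns.induct with
  | case1 => intro _; simp [pvRuns]
  | case2 x t ih =>
    intro hs
    have hdp : ((x :: t).dropWhile (fun y => y == x)).Pairwise (· ≤ ·) :=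
      hs.sublist (List.dropWhile_sublist _)
    have hlt := sorted_dropWhile_lt x t hs
    obtain ⟨ih1, ih2, ih3⟩ := ih hdp
    have hsubset : ∀ z ∈ (x :: t).dropWhile (fun y => y == x), z ∈ (x :: t) :=
      fun z hz => (List.dropWhile_sublist _).subset hz
    rw [pvRuns]
    refine ⟨?_, ?_, ?_⟩
    · intro p hp
      rcases List.mem_cons.mp hp with rfl | hp'
      · exact ⟨List.mem_cons_self, by rw [count_head_sorted x t hs]⟩
      · obtain ⟨hmem, hcnt⟩ := ih1 p hp'
        refine ⟨hsubset _ hmem, ?_⟩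
        rw [count_tail_sorted x t p.1 (hlt p.1 hmem)]
        exact hcnt
    · intro z hz
      rw [← List.takeWhile_append_dropWhile (p := fun y => y == x) (l := x :: t)] at hz
      rcases List.mem_append.mp hz with hz' | hz'
      · have := List.mem_takeWhile_imp hz'
        simp only [beq_iff_eq] at this
        simp [this]
      · simp only [List.map_cons, List.mem_cons]
        exact Or.inr (ih2 z hz')
    · simp only [List.map_cons]
      refine List.nodup_cons.mpr ⟨?_, ih3⟩
      intro hx
      obtain ⟨p, hp, hfst⟩ := List.mem_map.mp hx
      have := hlt p.1 (ih1 p hp).1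
      omega

-- characterisation of B's loop on a nonempty run list with positive lengths:
-- best_len is the max length, best_val the value of the first run attaining it,
-- and tie holds exactly when the max length occurs at least twice
lemma scanLoop_char (L : List (Int × Int)) (h1 : ∀ p ∈ L, 1 ≤ p.2) (hne : L ≠ []) :
    (L.foldl pvStepB (0, -1, false)).1 = (L.map (fun p => p.2)).foldl max 0 ∧
    (L.foldl pvStepB (0, -1, false)).2.1
      = ((L.find? (fun p => p.2 == (L.map (fun p => p.2)).foldl max 0)).map Prod.fst).getD (-1) ∧
    ((L.foldl pvStepB (0, -1, false)).2.2 = true ↔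
      2 ≤ L.countP (fun p => p.2 == (L.map (fun p => p.2)).foldl max 0)) := by
  induction L using List.reverseRecOn with
  | nil => exact absurd rfl hne
  | append_singleton L p ih =>
    by_cases hL : L = []
    · subst hL
      have hp : 1 ≤ p.2 := h1 p (by simp)
      simp only [List.nil_append, List.foldl_cons, List.foldl_nil, List.map_cons, List.map_nil,
        List.countP_cons, List.countP_nil]
      unfold pvStepB
      have h0 : max 0 p.2 = p.2 := by omega
      simp only [h0]
      rw [if_pos (show (0:Int) < p.2 by omega),
          List.find?_cons_of_pos (by simp)]
      refine ⟨rfl, by simp, ?_⟩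
      simp only [show (p.2 == p.2) = true by simp]
      show (false = true ↔ 2 ≤ 0 + 1)
      constructor
      · intro h; simp at h
      · intro h; omega
    · have h1L : ∀ q ∈ L, 1 ≤ q.2 := fun q hq => h1 q (by simp [hq])
      have hp : 1 ≤ p.2 := h1 p (by simp)
      obtain ⟨hmt, hmo, htie⟩ := ih h1L hL
      set M := (L.map (fun p => p.2)).foldl max 0 with hM
      have hMmax : ∀ q ∈ L, q.2 ≤ M := by
        intro q hq
        exact (PySem.List.le_foldl_max (L.map (fun p => p.2)) 0).2 q.2
          (List.mem_map.mpr ⟨q, hq, rfl⟩)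
      have hM' : ((L ++ [p]).map (fun p => p.2)).foldl max 0 = max M p.2 := by
        rw [List.map_append, List.foldl_append]; rfl
      rw [List.foldl_append]
      set r := L.foldl pvStepB (0, -1, false) with hr
      simp only [List.foldl_cons, List.foldl_nil]
      rcases lt_trichotomy M p.2 with hc | hc | hc
      · -- new strict maximum
        have hstep : pvStepB r p = (p.2, p.1, false) := by
          unfold pvStepB; rw [hmt, if_pos hc]
        rw [hstep, hM']
        have hmax : max M p.2 = p.2 := by omega
        rw [hmax]
        have hnone : L.find? (fun q => q.2 == p.2) = none :=
          List.find?_eq_none.mpr (fun q hq => by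
            have := hMmax q hq; simp; omega)
        have hcnt0 : L.countP (fun q => q.2 == p.2) = 0 :=
          List.countP_eq_zero.mpr (fun q hq => by
            have := hMmax q hq; simp; omega)
        refine ⟨rfl, ?_, ?_⟩
        · rw [List.find?_append, hnone]
          rw [List.find?_cons_of_pos (by simp)]
          rfl
        · rw [List.countP_append, hcnt0, List.countP_cons, List.countP_nil]
          simp only [show (p.2 == p.2) = true by simp, if_true]
          constructor
          · intro h; simp at h
          · intro h; omega
      · -- tied with the current maximum
        have hstep : pvStepB r p = (r.1, r.2.1, true) := by
          unfold pvStepB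
          rw [hmt, if_neg (by omega), if_pos (by omega)]
        rw [hstep, hM']
        have hmax : max M p.2 = M := by omega
        rw [hmax]
        have hMmem : M ∈ L.map (fun p => p.2) := by
          rcases PySem.List.foldl_max_mem (L.map (fun p => p.2)) 0 with h0 | h0
          · exfalso
            obtain ⟨q0, t0, rfl⟩ := List.exists_cons_of_ne_nil hL
            have := h1L q0 List.mem_cons_self
            have := hMmax q0 List.mem_cons_self
            rw [← hM] at h0; omega
          · exact h0
        obtain ⟨q, hqL, hq2⟩ := List.mem_map.mp hMmem
        have hcntpos : 0 < L.countP (fun q => q.2 == M) :=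
          List.countP_pos_iff.mpr ⟨q, hqL, by simp [hq2]⟩
        obtain ⟨q0, hfind⟩ : ∃ q0, L.find? (fun q => q.2 == M) = some q0 := by
          have : (L.find? (fun q => q.2 == M)).isSome :=
            List.find?_isSome.mpr ⟨q, hqL, by simp [hq2]⟩
          exact Option.isSome_iff_exists.mp this
        refine ⟨hmt, ?_, ?_⟩
        · rw [List.find?_append, hfind, Option.some_or, ← hfind, hmo]
        · rw [List.countP_append, List.countP_cons, List.countP_nil]
          simp only [show (p.2 == M) = true by simp [hc], if_true]
          constructor
          · intro _; omega
          · intro _; simp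
      · -- smaller count: state unchanged
        have hstep : pvStepB r p = r := by
          unfold pvStepB
          rw [hmt, if_neg (by omega), if_neg (by omega)]
        rw [hstep, hM']
        have hmax : max M p.2 = M := by omega
        rw [hmax]
        have hnone : List.find? (fun q : Int × Int => q.2 == M) [p] = none := by
          apply List.find?_eq_none.mpr
          intro q hq
          simp only [List.mem_singleton] at hq
          subst hq
          simp
          omega
        refine ⟨hmt, ?_, ?_⟩
        · rw [List.find?_append, hnone, Option.or_none, hmo]
        · rw [List.countP_append, List.countP_cons, List.countP_nil]
          simp only [show (p.2 == M) = false by simp; omega]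
          simpa using htie

-- characterisation of A's mode loop on a nonempty items list with positive counts:
-- mode_times is the max count, mode the first key attaining it, and
-- second_times equals mode_times exactly when the max count occurs at least twice
lemma modeLoop_char (L : List (Int × Int)) (h1 : ∀ p ∈ L, 1 ≤ p.2) (hne : L ≠ []) :
    (L.foldl pvModeStep (none, 0, 0)).2.1 = (L.map (fun p => p.2)).foldl max 0 ∧
    (L.foldl pvModeStep (none, 0, 0)).1
      = (L.find? (fun p => p.2 == (L.map (fun p => p.2)).foldl max 0)).map (fun p => p.1) ∧
    (L.foldl pvModeStep (none, 0, 0)).2.2 ≤ (L.map (fun p => p.2)).foldl max 0 ∧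
    ((L.foldl pvModeStep (none, 0, 0)).2.2 = (L.map (fun p => p.2)).foldl max 0 ↔
      2 ≤ L.countP (fun p => p.2 == (L.map (fun p => p.2)).foldl max 0)) := by
  induction L using List.reverseRecOn with
  | nil => exact absurd rfl hne
  | append_singleton L p ih =>
    by_cases hL : L = []
    · subst hL
      have hp : 1 ≤ p.2 := h1 p (by simp)
      simp only [List.nil_append, List.foldl_cons, List.foldl_nil, List.map_cons, List.map_nil,
        List.countP_cons, List.countP_nil]
      unfold pvModeStep
      have h0 : max 0 p.2 = p.2 := by omega
      simp only [h0]
      rw [if_pos (show (0:Int) < p.2 by omega),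
          List.find?_cons_of_pos (by simp)]
      refine ⟨rfl, by simp, show (0:Int) ≤ p.2 by omega, ?_⟩
      simp only [show (p.2 == p.2) = true by simp]
      show (0 = p.2 ↔ 2 ≤ 0 + 1)
      constructor
      · intro h; omega
      · intro h; omega
    · have h1L : ∀ q ∈ L, 1 ≤ q.2 := fun q hq => h1 q (by simp [hq])
      have hp : 1 ≤ p.2 := h1 p (by simp)
      obtain ⟨hmt, hmo, hstle, hstiff⟩ := ih h1L hL
      set M := (L.map (fun p => p.2)).foldl max 0 with hM
      have hMmax : ∀ q ∈ L, q.2 ≤ M := by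
        intro q hq
        exact (PySem.List.le_foldl_max (L.map (fun p => p.2)) 0).2 q.2
          (List.mem_map.mpr ⟨q, hq, rfl⟩)
      have hM' : ((L ++ [p]).map (fun p => p.2)).foldl max 0 = max M p.2 := by
        rw [List.map_append, List.foldl_append]; rfl
      rw [List.foldl_append]
      set r := L.foldl pvModeStep (none, 0, 0) with hr
      simp only [List.foldl_cons, List.foldl_nil]
      rcases lt_trichotomy M p.2 with hc | hc | hc
      · -- new strict maximum
        have hstep : pvModeStep r p = (some p.1, p.2, r.2.2) := by
          unfold pvModeStep; rw [hmt, if_pos hc]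
        rw [hstep, hM']
        have hmax : max M p.2 = p.2 := by omega
        rw [hmax]
        have hnone : L.find? (fun q => q.2 == p.2) = none :=
          List.find?_eq_none.mpr (fun q hq => by
            have := hMmax q hq; simp; omega)
        have hcnt0 : L.countP (fun q => q.2 == p.2) = 0 :=
          List.countP_eq_zero.mpr (fun q hq => by
            have := hMmax q hq; simp; omega)
        refine ⟨rfl, ?_, show r.2.2 ≤ p.2 by omega, ?_⟩
        · rw [List.find?_append, hnone]
          rw [List.find?_cons_of_pos (by simp)]
          rfl
        · rw [List.countP_append, hcnt0, List.countP_cons, List.countP_nil]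
          simp only [show (p.2 == p.2) = true by simp, if_true]
          show (r.2.2 = p.2 ↔ 2 ≤ 0 + (0 + 1))
          constructor
          · intro h; omega
          · intro h; omega
      · -- count equal to the current maximum: tie recorded
        have hstep : pvModeStep r p = (r.1, r.2.1, p.2) := by
          unfold pvModeStep
          rw [hmt, if_neg (by omega), if_pos (by omega)]
        rw [hstep, hM']
        have hmax : max M p.2 = M := by omega
        rw [hmax]
        have hMmem : M ∈ L.map (fun p => p.2) := by
          rcases PySem.List.foldl_max_mem (L.map (fun p => p.2)) 0 with h0 | h0
          · exfalso; rw [← hM] at h0; omega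
          · exact h0
        obtain ⟨q, hqL, hq2⟩ := List.mem_map.mp hMmem
        obtain ⟨q0, hfind⟩ : ∃ q0, L.find? (fun q => q.2 == M) = some q0 := by
          have : (L.find? (fun q => q.2 == M)).isSome :=
            List.find?_isSome.mpr ⟨q, hqL, by simp [hq2]⟩
          exact Option.isSome_iff_exists.mp this
        have hcntpos : 0 < L.countP (fun q => q.2 == M) :=
          List.countP_pos_iff.mpr ⟨q, hqL, by simp [hq2]⟩
        refine ⟨hmt, ?_, show p.2 ≤ M by omega, ?_⟩
        · rw [List.find?_append, hfind, Option.some_or, ← hfind, hmo]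
        · rw [List.countP_append, List.countP_cons, List.countP_nil]
          simp only [show (p.2 == M) = true by simp [hc], if_true]
          show (p.2 = M ↔ 2 ≤ L.countP (fun q => q.2 == M) + (0 + 1))
          constructor
          · intro _; omega
          · intro _; omega
      · -- smaller count: state unchanged
        have hstep : pvModeStep r p = r := by
          unfold pvModeStep
          rw [hmt, if_neg (by omega), if_neg (by omega)]
        rw [hstep, hM']
        have hmax : max M p.2 = M := by omega
        rw [hmax]
        have hnone : List.find? (fun q : Int × Int => q.2 == M) [p] = none := by
          apply List.find?_eq_none.mpr
          intro q hq
          simp only [List.mem_singleton] at hq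
          subst hq
          simp
          omega
        refine ⟨hmt, ?_, hstle, ?_⟩
        · rw [List.find?_append, hnone, Option.or_none, hmo]
        · rw [List.countP_append, List.countP_cons, List.countP_nil]
          simp only [show (p.2 == M) = false by simp; omega]
          simpa using hstiff

-- A's counting step is extensionally get-then-insert
lemma pvStepCount_eq : pvStepCount = fun (d : PySem.Dict Int Int) x => d.insert x (d.getD x 0 + 1) := by
  funext d x
  unfold pvStepCount
  by_cases h : d.contains x = false
  · simp only [h, if_true]
    rw [PySem.Dict.getD_insert_self, PySem.Dict.insert_insert_self,
        PySem.Dict.getD_of_not_contains d 0 h]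
  · have h' : d.contains x = true := by simpa using h
    simp [h']

-- two lists of positive ints with the same members have the same running max
lemma foldl_max_eq_of_mem_iff (l1 l2 : List Int) (h1 : ∀ a ∈ l1, 1 ≤ a) (h2 : ∀ a ∈ l2, 1 ≤ a)
    (hne1 : l1 ≠ []) (hne2 : l2 ≠ []) (hmem : ∀ a, a ∈ l1 ↔ a ∈ l2) :
    l1.foldl max 0 = l2.foldl max 0 := by
  have key : ∀ (m1 m2 : List Int), (∀ a ∈ m1, 1 ≤ a) → m1 ≠ [] → (∀ a, a ∈ m1 ↔ a ∈ m2) →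
      m1.foldl max 0 ≤ m2.foldl max 0 := by
    intro m1 m2 hp hn hm
    obtain ⟨a0, t0, rfl⟩ := List.exists_cons_of_ne_nil hn
    have ha0 : a0 ≤ (a0 :: t0).foldl max 0 :=
      (PySem.List.le_foldl_max _ 0).2 a0 List.mem_cons_self
    have hpos : 1 ≤ (a0 :: t0).foldl max 0 := le_trans (hp a0 List.mem_cons_self) ha0
    have hmm : (a0 :: t0).foldl max 0 ∈ (a0 :: t0) := by
      rcases PySem.List.foldl_max_mem (a0 :: t0) 0 with h0 | h0
      · omega
      · exact h0
    exact (PySem.List.le_foldl_max _ 0).2 _ ((hm _).mp hmm)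
  exact le_antisymm (key l1 l2 h1 hne1 hmem) (key l2 l1 h2 hne2 (fun a => (hmem a).symm))

-- countP agrees on nodup lists with the same members
lemma countP_eq_of_nodup_mem_iff (l1 l2 : List Int) (p : Int → Bool) (h1 : l1.Nodup)
    (h2 : l2.Nodup) (hmem : ∀ a, a ∈ l1 ↔ a ∈ l2) : l1.countP p = l2.countP p := by
  have hfin : l1.toFinset = l2.toFinset := by
    ext a
    simp only [List.mem_toFinset]
    exact hmem a
  rw [List.countP_eq_length_filter, List.countP_eq_length_filter,
      ← List.toFinset_card_of_nodup (h1.filter p), ← List.toFinset_card_of_nodup (h2.filter p),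
      List.toFinset_filter, List.toFinset_filter, hfin]

-- two distinct members both satisfying the predicate force countP ≥ 2
lemma two_le_countP_of_mem (L : List (Int × Int)) (p : Int × Int → Bool) (a b : Int × Int)
    (ha : a ∈ L) (hb : b ∈ L) (hab : a ≠ b) (hpa : p a = true) (hpb : p b = true) :
    2 ≤ L.countP p := by
  have ha' : a ∈ L.filter p := List.mem_filter.mpr ⟨ha, hpa⟩
  have hb' : b ∈ L.filter p := List.mem_filter.mpr ⟨hb, hpb⟩
  rw [List.countP_eq_length_filter]
  cases hf : L.filter p with
  | nil => rw [hf] at ha'; exact absurd ha' (by simp)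
  | cons c d =>
    cases d with
    | nil =>
      rw [hf] at ha' hb'
      simp only [List.mem_singleton] at ha' hb'
      exact absurd (ha'.trans hb'.symm) hab
    | cons e f => simp

-- ===== VERDICT (by name: the statement is the Claim_ definition above) =====
theorem solution_spec : Claim_equal_solution := by
  intro array _
  unfold Spec_solution
  by_cases hA : array = []
  · subst hA
    show solution [] = solution_alt []
    unfold solution solution_alt
    have hs0 : PySem.List.sorted ([] : List Int) (fun x => x) false = [] := rfl
    rw [hs0]
    simp [pvRunScan]
    intro h
    exact absurd rfl h
  · -- A-side characterisation
    show solution array = solution_alt array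
    unfold solution solution_alt
    rw [pvStepCount_eq, PySem.Dict.foldl_insert_getD_add_one_eq_counter, pvRunScan_eq_foldl]
    set L := (PySem.Dict.counter array).items with hLdef
    have hLitems : L = (PySem.Set.ofList array).map (fun k => (k, (array.count k : Int))) := by
      rw [hLdef, PySem.Dict.items_counter]
    have hAk : ∀ p ∈ L, p.1 ∈ array ∧ p.2 = (array.count p.1 : Int) := by
      intro p hp
      rw [hLitems] at hp
      obtain ⟨k, hk, rfl⟩ := List.mem_map.mp hp
      exact ⟨(PySem.Set.mem_ofList _ _).mp hk, rfl⟩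
    have h1 : ∀ p ∈ L, 1 ≤ p.2 := by
      intro p hp
      obtain ⟨hmem, hcnt⟩ := hAk p hp
      have := List.count_pos_iff.mpr hmem
      rw [hcnt]
      omega
    have hAfst : L.map Prod.fst = PySem.Set.ofList array := by
      rw [hLitems, List.map_map]
      have hid : (Prod.fst ∘ fun k : Int => (k, (array.count k : Int))) = id := rfl
      rw [hid, List.map_id]
    have hne : L ≠ [] := by
      obtain ⟨a, t, rfl⟩ := List.exists_cons_of_ne_nil hA
      rw [hLitems]
      intro h
      rw [List.map_eq_nil_iff] at h
      exact (List.ne_nil_of_mem ((PySem.Set.mem_ofList _ _).mpr (List.mem_cons_self))) h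
    obtain ⟨hmt, hmo, hstle, hstiff⟩ := modeLoop_char L h1 hne
    set M := (L.map (fun p => p.2)).foldl max 0 with hM
    -- B-side characterisation
    set s := PySem.List.sorted array (fun x => x) false with hsdef
    have hsp : s.Pairwise (· ≤ ·) := by
      have := PySem.List.sorted_pairwise array (fun x => x)
      simpa using this
    have hperm : s.Perm array := PySem.List.sorted_perm array (fun x => x) false
    have hsne : s ≠ [] := by
      intro h
      rw [h] at hperm
      exact hA (hperm.nil_eq.symm)
    set LB := pvRuns s with hLB
    obtain ⟨hb1, hb2, hb3⟩ := pvRuns_char s hsp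
    have hBk : ∀ p ∈ LB, p.1 ∈ array ∧ p.2 = (array.count p.1 : Int) := by
      intro p hp
      obtain ⟨hmem, hcnt⟩ := hb1 p hp
      exact ⟨hperm.subset hmem, by rw [hcnt, hperm.count_eq]⟩
    have h1B : ∀ p ∈ LB, 1 ≤ p.2 := by
      intro p hp
      obtain ⟨hmem, hcnt⟩ := hBk p hp
      have := List.count_pos_iff.mpr hmem
      rw [hcnt]
      omega
    have hBmem : ∀ z ∈ array, z ∈ LB.map Prod.fst := fun z hz =>
      hb2 z (hperm.mem_iff.mpr hz)
    have hneB : LB ≠ [] := by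
      obtain ⟨a, t, hst⟩ := List.exists_cons_of_ne_nil hsne
      rw [hLB, hst, pvRuns]
      simp
    obtain ⟨sbt, sbo, sbtie⟩ := scanLoop_char LB h1B hneB
    set MB := (LB.map (fun p => p.2)).foldl max 0 with hMB
    -- the two maxima agree
    have hMeq : M = MB := by
      apply foldl_max_eq_of_mem_iff
      · intro a ha
        obtain ⟨p, hp, rfl⟩ := List.mem_map.mp ha
        exact h1 p hp
      · intro a ha
        obtain ⟨p, hp, rfl⟩ := List.mem_map.mp ha
        exact h1B p hp
      · simpa using hne
      · simpa using hneB
      · intro a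
        constructor
        · intro ha
          obtain ⟨p, hp, rfl⟩ := List.mem_map.mp ha
          obtain ⟨hk, hc⟩ := hAk p hp
          obtain ⟨q, hq, hqf⟩ := List.mem_map.mp (hBmem p.1 hk)
          refine List.mem_map.mpr ⟨q, hq, ?_⟩
          rw [(hBk q hq).2, hqf, hc]
        · intro ha
          obtain ⟨p, hp, rfl⟩ := List.mem_map.mp ha
          obtain ⟨hk, hc⟩ := hBk p hp
          have : p.1 ∈ L.map Prod.fst := by
            rw [hAfst]
            exact (PySem.Set.mem_ofList _ _).mpr hk
          obtain ⟨q, hq, hqf⟩ := List.mem_map.mp this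
          refine List.mem_map.mpr ⟨q, hq, ?_⟩
          rw [(hAk q hq).2, hqf, hc]
    -- the two tie counts agree
    have hcntA : L.countP (fun p => p.2 == M)
        = (L.map Prod.fst).countP (fun k => (array.count k : Int) == M) := by
      rw [List.countP_map]
      apply List.countP_congr
      intro p hp
      simp only [Function.comp]
      rw [(hAk p hp).2]
    have hcntB : LB.countP (fun p => p.2 == MB)
        = (LB.map Prod.fst).countP (fun k => (array.count k : Int) == M) := by
      rw [List.countP_map]
      apply List.countP_congr
      intro p hp
      simp only [Function.comp]
      rw [(hBk p hp).2, hMeq]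
    have hkeys : ∀ a, a ∈ L.map Prod.fst ↔ a ∈ LB.map Prod.fst := by
      intro a
      constructor
      · intro ha
        rw [hAfst] at ha
        exact hBmem a ((PySem.Set.mem_ofList _ _).mp ha)
      · intro ha
        obtain ⟨p, hp, rfl⟩ := List.mem_map.mp ha
        rw [hAfst]
        exact (PySem.Set.mem_ofList _ _).mpr (hBk p hp).1
    have hAnodup : (L.map Prod.fst).Nodup := by
      rw [hAfst]
      exact PySem.Set.nodup_ofList array
    have hcnteq : L.countP (fun p => p.2 == M) = LB.countP (fun p => p.2 == MB) := by
      rw [hcntA, hcntB]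
      exact countP_eq_of_nodup_mem_iff _ _ _ hAnodup hb3 hkeys
    set cnt := L.countP (fun p => p.2 == M) with hcnt
    have hcntpos : 1 ≤ cnt := by
      obtain ⟨p0, Lt, hL0⟩ := List.exists_cons_of_ne_nil hne
      have hp0 : 1 ≤ p0.2 := h1 p0 (hL0 ▸ List.mem_cons_self)
      have hMpos : 1 ≤ M := by
        have := (PySem.List.le_foldl_max (L.map (fun p => p.2)) 0).2 p0.2
          (List.mem_map.mpr ⟨p0, hL0 ▸ List.mem_cons_self, rfl⟩)
        omega
      have hMmem : M ∈ L.map (fun p => p.2) := by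
        rcases PySem.List.foldl_max_mem (L.map (fun p => p.2)) 0 with h0 | h0
        · exfalso; rw [← hM] at h0; omega
        · exact h0
      obtain ⟨q, hqL, hq2⟩ := List.mem_map.mp hMmem
      have : 0 < cnt := List.countP_pos_iff.mpr ⟨q, hqL, by simp [hq2]⟩
      omega
    by_cases hone : cnt = 1
    · -- unique mode: both return the key of maximal count
      have hst : (L.foldl pvModeStep (none, 0, 0)).2.2 ≠ M := by
        intro h
        have := hstiff.mp h
        omega
      have htieB : (LB.foldl pvStepB (0, -1, false)).2.2 = false := by
        rcases Bool.eq_false_or_eq_true ((LB.foldl pvStepB (0, -1, false)).2.2) with h | h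
        swap
        · exact h
        · exfalso
          have := sbtie.mp h
          rw [← hcnteq] at this
          omega
      rw [if_pos (by rw [hmt]; exact fun h => hst h.symm)]
      simp only [htieB, Bool.false_eq_true, if_false]
      -- both sides are the first key with maximal count; keys are unique, so they agree
      obtain ⟨qA, hfA⟩ : ∃ q, L.find? (fun p => p.2 == M) = some q := by
        have hpos : 0 < cnt := by omega
        obtain ⟨q, hqL, hq⟩ := List.countP_pos_iff.mp hpos
        exact Option.isSome_iff_exists.mp (List.find?_isSome.mpr ⟨q, hqL, hq⟩)
      obtain ⟨qB, hfB⟩ : ∃ q, LB.find? (fun p => p.2 == MB) = some q := by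
        have hpos : 0 < LB.countP (fun p => p.2 == MB) := by rw [← hcnteq]; omega
        obtain ⟨q, hqL, hq⟩ := List.countP_pos_iff.mp hpos
        exact Option.isSome_iff_exists.mp (List.find?_isSome.mpr ⟨q, hqL, hq⟩)
      have hqAL : qA ∈ L := List.mem_of_find?_eq_some hfA
      have hqBL : qB ∈ LB := List.mem_of_find?_eq_some hfB
      have hqAM : (array.count qA.1 : Int) = M := by
        have hthis := List.find?_some (p := fun p : Int × Int => p.2 == M) hfA
        simp only [beq_iff_eq] at hthis
        rw [← (hAk qA hqAL).2, hthis]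
      have hqBM : (array.count qB.1 : Int) = M := by
        have hthis := List.find?_some (p := fun p : Int × Int => p.2 == MB) hfB
        simp only [beq_iff_eq] at hthis
        rw [← (hBk qB hqBL).2, hthis, hMeq]
      have hkey : qA.1 = qB.1 := by
        by_contra hne'
        obtain ⟨p', hp', hpf⟩ := List.mem_map.mp
          ((hkeys qB.1).mpr (List.mem_map.mpr ⟨qB, hqBL, rfl⟩))
        have hp'M : (p'.2 == M) = true := by
          simp only [beq_iff_eq]
          rw [(hAk p' hp').2, hpf, hqBM]
        have hqAM' := List.find?_some (p := fun p : Int × Int => p.2 == M) hfA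
        have hpne : qA ≠ p' := by
          intro h
          rw [h, hpf] at hne'
          exact hne' rfl
        have := two_le_countP_of_mem L (fun p => p.2 == M) qA p' hqAL hp' hpne hqAM' hp'M
        omega
      rw [hmo, hfA, sbo, hfB]
      simp [hkey]
    · -- tied mode: both return -1
      have h2 : 2 ≤ cnt := by omega
      have hst : (L.foldl pvModeStep (none, 0, 0)).2.2 = M := hstiff.mpr h2
      rw [if_neg (by rw [hmt, hst]; simp)]
      have htieB : (LB.foldl pvStepB (0, -1, false)).2.2 = true := by
        apply sbtie.mpr
        rw [← hcnteq]
        omega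
      simp [htieB]
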